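-- pv_equiv track=rewrite | github.com/jablka/HackInScience | Python - Realist/10 Dyck words.py | is_a_dyck_word
-- ===== SOURCE A (Python) =====
-- import collections
--
-- def is_a_dyck_word(word: str) -> bool:
--
--     if bool(word) == False: # word = "" , should evaluate to True
--         return True
--
--     if len(set(word)) != 2: # word should have precisely two kinds of characters
--         return False
--
--     tellme = collections.Counter(word)
--     mkeys = [i for i in tellme.keys()]
--     if tellme[mkeys[0]] != tellme[mkeys[1]]: # musí byť rovnaký počet obidvoch znakov / equal count of both characters
--         return False
--
--     initial = word[0] # initial character
--     buffer = [ ]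
--     for i in range(len(word) ):
--
--         if word[i]==initial: # if encounter initial character, append it to buffer
--             buffer.append(word[i])
--
--         else:
--             if len(buffer)>0:
--                 buffer.pop() # if we have closing character, pop the buffer
--             else:
--                 return False # if the buffer is already empty, word can't be a 'Dyck word'
--
--     return True
-- ===== SOURCE B (Python) =====
-- def is_a_dyck_word(word: str) -> bool:
--     # Rewriting approach: repeatedly cancel the first opener+closer pair until
--     # no pair remains; the word is Dyck iff it reduces to the empty string.
--     if not word:
--         return True
--     if len(set(word)) != 2:
--         return False
--     opener = word[0]
--     closer = next(ch for ch in word if ch != opener)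
--     pair = opener + closer
--     while pair in word:
--         word = word.replace(pair, '', 1)
--     return word == ''
-- ===== Notes on version B (the rewrite author's own statement) =====
-- stated objective: alternative
-- what changed: Replaces the single-pass stack scan (plus Counter equal-count guard) by iterated rewriting: repeatedly delete the first opener+closer pair until none remains and test whether the word reduced to the empty string.
import Mathlib
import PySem

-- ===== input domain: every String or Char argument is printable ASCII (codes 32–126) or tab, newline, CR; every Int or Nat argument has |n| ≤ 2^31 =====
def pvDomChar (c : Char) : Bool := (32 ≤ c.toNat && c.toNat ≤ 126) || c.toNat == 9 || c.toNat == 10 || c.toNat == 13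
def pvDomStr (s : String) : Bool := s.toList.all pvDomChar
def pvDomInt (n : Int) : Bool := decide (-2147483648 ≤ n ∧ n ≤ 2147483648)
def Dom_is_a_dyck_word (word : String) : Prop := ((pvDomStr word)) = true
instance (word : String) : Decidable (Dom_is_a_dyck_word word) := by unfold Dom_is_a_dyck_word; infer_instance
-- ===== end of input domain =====

-- B replaces A's stack scan (plus Counter guard) by iterated first-pair cancellation
-- (delete the first opener+closer occurrence until none remains, then test emptiness); objective: alternative.


-- ===== PORT A =====
-- the for-loop over word's characters with the stack list 'buffer'
def dyckLoopA (initial : Char) : List Char → List Char → Bool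
  | [], _ => true
  | c :: rest, buffer =>
      if c == initial then dyckLoopA initial rest (buffer ++ [c])
      else if buffer.length > 0 then dyckLoopA initial rest buffer.dropLast
      else false

def is_a_dyck_word (word : String) : Bool :=
  match word.toList with
  | [] => true                                   -- bool(word) == False
  | c0 :: tl =>
    let chars := c0 :: tl
    if (PySem.Set.ofList chars).length ≠ 2 then false
    else
      let tellme := PySem.Dict.counter chars
      let mkeys := tellme.keys
      match mkeys with
      | k0 :: k1 :: _ =>
          if tellme.getD k0 0 ≠ tellme.getD k1 0 then false
          else dyckLoopA c0 chars []             -- initial = word[0], buffer = []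
      | _ => false  -- unreachable: with exactly two distinct characters the Counter has two keys

-- ===== PORT B =====
-- `pair in word` for the two-character pair opener+closer (exact: substring containment)
def hasPairB (o c : Char) : List Char → Bool
  | [] => false
  | [_] => false
  | x :: y :: rest => (x == o && y == c) || hasPairB o c (y :: rest)

-- `word.replace(pair, '', 1)` (exact: delete the first occurrence of the two-char pair)
def removeFirstB (o c : Char) : List Char → List Char
  | [] => []
  | [x] => [x]
  | x :: y :: rest => if x == o && y == c then rest else x :: removeFirstB o c (y :: rest)

-- termination of the while-loop: a successful deletion shortens the word
lemma removeFirstB_length_lt (o c : Char) :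
    ∀ l : List Char, hasPairB o c l = true → (removeFirstB o c l).length < l.length := by
  intro l
  induction l with
  | nil => intro h; simp [hasPairB] at h
  | cons x rest ih =>
      cases rest with
      | nil => intro h; simp [hasPairB] at h
      | cons y rest' =>
          intro h
          simp only [hasPairB, Bool.or_eq_true] at h
          simp only [removeFirstB]
          by_cases hm : (x == o && y == c) = true
          · simp [hm]
          · rcases h with h | h
            · exact absurd h hm
            · rw [if_neg hm]
              simp only [List.length_cons]
              have := ih h
              simp only [List.length_cons] at this
              omega

-- the while-loop: while pair in word: word = word.replace(pair, '', 1)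
def reduceB (o c : Char) (l : List Char) : List Char :=
  if h : hasPairB o c l = true then reduceB o c (removeFirstB o c l) else l
  termination_by l.length
  decreasing_by exact removeFirstB_length_lt o c l h

def is_a_dyck_word_alt (word : String) : Bool :=
  let chars := word.toList
  if chars.isEmpty then true                       -- if not word
  else if (PySem.Set.ofList chars).length ≠ 2 then false
  else
    match chars.head? with                          -- opener = word[0] (nonempty here)
    | none => false  -- unreachable: chars is nonempty in this branch
    | some opener =>
      -- closer = next(ch for ch in word if ch != opener); guaranteed to exist by the guard
      match chars.find? (fun ch => ch != opener) with
      | none => false  -- unreachable: the two-kinds guard ensures a second character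
      | some closer => decide (reduceB opener closer chars = [])

-- ===== PRECONDITION & SPEC =====
def Spec_is_a_dyck_word (word : String) (out : Bool) : Prop := out = is_a_dyck_word_alt word
instance (word : String) (out : Bool) : Decidable (Spec_is_a_dyck_word word out) := by unfold Spec_is_a_dyck_word; infer_instance

-- ===== CLAIM =====
def Claim_equal_is_a_dyck_word : Prop := ∀ (word : String), Dom_is_a_dyck_word word → Spec_is_a_dyck_word word (is_a_dyck_word word)

-- ===== LEMMAS AND PROOFS =====

-- proof-side characterization: running balance (+1 on opener, -1 otherwise) and its minimum
def dyckStepB (opener : Char) (p : Int × Int) (ch : Char) : Int × Int :=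
  let bal := p.1 + (if ch == opener then 1 else -1)
  (bal, if bal < p.2 then bal else p.2)

lemma dyckStepB_inv (o : Char) (s : Int × Int) (ch : Char) :
    (dyckStepB o s ch).2 ≤ (dyckStepB o s ch).1 := by
  simp only [dyckStepB]
  split <;> split <;> omega

-- the tracked minimum never increases along the fold
lemma dyck_low_le (o : Char) : ∀ (l : List Char) (s : Int × Int),
    (l.foldl (dyckStepB o) s).2 ≤ s.2 := by
  intro l
  induction l with
  | nil => intro s; simp
  | cons c rest ih =>
      intro s
      refine le_trans (ih _) ?_
      simp only [dyckStepB]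
      split <;> omega

-- A's stack loop succeeds iff the minimum of the walk started at the stack height is 0
lemma dyckLoopA_eq (o : Char) : ∀ (l : List Char) (buf : List Char),
    dyckLoopA o l buf = decide ((l.foldl (dyckStepB o) ((buf.length : Int), 0)).2 = 0) := by
  intro l
  induction l with
  | nil => intro buf; simp [dyckLoopA]
  | cons c rest ih =>
      intro buf
      simp only [dyckLoopA, List.foldl_cons]
      by_cases hc : (c == o) = true
      · have hstep : dyckStepB o ((buf.length : Int), 0) c = (((buf ++ [c]).length : Int), 0) := by
          simp only [dyckStepB, hc, if_true]
          rw [if_neg (by omega : ¬ (((buf.length : Int), (0 : Int)).1 + 1 < ((buf.length : Int), (0 : Int)).2))]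
          simp only [Prod.mk.injEq, List.length_append, List.length_cons, List.length_nil]
          exact ⟨by push_cast; ring, trivial⟩
        rw [if_pos hc]
        simp only [hstep]
        exact ih (buf ++ [c])
      · rw [if_neg hc]
        by_cases hb : buf.length > 0
        · have hstep : dyckStepB o ((buf.length : Int), 0) c = ((buf.dropLast.length : Int), 0) := by
            simp only [dyckStepB, hc, Bool.false_eq_true, if_false]
            rw [if_neg (by omega : ¬ (((buf.length : Int), (0 : Int)).1 + (-1) < ((buf.length : Int), (0 : Int)).2))]
            simp only [Prod.mk.injEq, List.length_dropLast]
            exact ⟨by omega, trivial⟩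
          rw [if_pos (by simpa using hb)]
          simp only [hstep]
          exact ih buf.dropLast
        · have hb0 : buf.length = 0 := by omega
          have hstep : dyckStepB o ((buf.length : Int), 0) c = (-1, -1) := by
            simp [dyckStepB, hc, hb0]
          rw [if_neg (by simpa using hb)]
          simp only [hstep]
          have hle := dyck_low_le o rest (-1, -1)
          have : ¬ ((rest.foldl (dyckStepB o) (-1, -1)).2 = 0) := by omega
          simp [this]

-- the balance after the fold is start + 2*count(opener) - length
lemma dyck_bal_eq (o : Char) : ∀ (l : List Char) (s : Int × Int),
    (l.foldl (dyckStepB o) s).1 = s.1 + 2 * (l.count o : Int) - (l.length : Int) := by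
  intro l
  induction l with
  | nil => intro s; simp
  | cons c rest ih =>
      intro s
      simp only [List.foldl_cons, ih, List.count_cons, List.length_cons]
      by_cases hc : (c == o) = true
      · simp only [dyckStepB, hc]
        push_cast
        ring
      · simp only [dyckStepB, hc]
        push_cast
        ring

-- if every element of l is k0 or k1 and k0 ≠ k1 then count k0 + count k1 = length
lemma dyck_count_partition (k0 k1 : Char) (hne : k0 ≠ k1) :
    ∀ (l : List Char), (∀ x ∈ l, x = k0 ∨ x = k1) →
      l.count k0 + l.count k1 = l.length := by
  intro l
  induction l with
  | nil => simp
  | cons c rest ih =>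
      intro h
      have hc := h c (by simp)
      have hrest : ∀ x ∈ rest, x = k0 ∨ x = k1 := fun x hx => h x (by simp [hx])
      have hih := ih hrest
      rcases hc with rfl | rfl
      · simp [hne]
        omega
      · simp [Ne.symm hne]
        omega

-- deleting an element keeps membership
lemma removeFirstB_subset (o c : Char) :
    ∀ (l : List Char) (x : Char), x ∈ removeFirstB o c l → x ∈ l := by
  intro l
  induction l with
  | nil => intro x hx; simp [removeFirstB] at hx
  | cons a rest ih =>
      cases rest with
      | nil => intro x hx; simp [removeFirstB] at hx; simp [hx]
      | cons y rest' =>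
          intro x hx
          simp only [removeFirstB] at hx
          by_cases hm : (a == o && y == c) = true
          · rw [if_pos hm] at hx; simp [hx]
          · rw [if_neg hm] at hx
            rcases List.mem_cons.mp hx with rfl | hx'
            · simp
            · have := ih x hx'
              simp only [List.mem_cons] at this ⊢
              tauto

-- deleting the first opener+closer pair preserves the (balance, minimum) fold
lemma removeFirstB_fold (o c : Char) (hne : (c == o) = false) :
    ∀ (l : List Char) (s : Int × Int), s.2 ≤ s.1 → hasPairB o c l = true →
      (removeFirstB o c l).foldl (dyckStepB o) s = l.foldl (dyckStepB o) s := by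
  intro l
  induction l with
  | nil => intro s _ h; simp [hasPairB] at h
  | cons x rest ih =>
      cases rest with
      | nil => intro s _ h; simp [hasPairB] at h
      | cons y rest' =>
          intro s hs h
          simp only [hasPairB, Bool.or_eq_true] at h
          simp only [removeFirstB]
          by_cases hm : (x == o && y == c) = true
          · rw [if_pos hm]
            obtain ⟨hx, hy⟩ := Bool.and_eq_true_iff.mp hm
            have hyo : (y == o) = false := by
              have : y = c := by simpa using hy
              simpa [this] using hne
            obtain ⟨b, low⟩ := s
            simp only [List.foldl_cons]
            have h1 : dyckStepB o (b, low) x = (b + 1, low) := by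
              simp only [dyckStepB, hx, if_true]
              rw [if_neg (by simp at hs ⊢; omega)]
            have h2 : dyckStepB o (b + 1, low) y = (b, low) := by
              simp only [dyckStepB, hyo, Bool.false_eq_true, if_false]
              rw [if_neg (by simp at hs ⊢; omega)]
              simp only [Prod.mk.injEq]
              exact ⟨by omega, trivial⟩
            rw [h1, h2]
          · rw [if_neg hm]
            rcases h with h | h
            · exact absurd h hm
            · simp only [List.foldl_cons]
              exact ih (dyckStepB o s x) (dyckStepB_inv o s x) h

-- with no pair left, a word starting with the opener is all openers
lemma noPair_all_opener (o c : Char) :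
    ∀ (rest : List Char), hasPairB o c (o :: rest) = false →
      (∀ x ∈ rest, x = o ∨ x = c) → ∀ x ∈ rest, x = o := by
  intro rest
  induction rest with
  | nil => intro _ _ x hx; simp at hx
  | cons y rest' ih =>
      intro h hmem x hx
      simp only [hasPairB, Bool.or_eq_false_iff, Bool.and_eq_false_iff] at h
      have hy : y = o := by
        rcases hmem y (by simp) with rfl | rfl
        · rfl
        · rcases h.1 with h' | h'
          · simp at h'
          · simp at h'
      subst hy
      rcases List.mem_cons.mp hx with rfl | hx'
      · rfl
      · exact ih h.2 (fun z hz => hmem z (by simp [hz])) x hx'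

-- a nonempty pair-free word is not balanced
lemma noPair_not_balanced (o c : Char) (hne : (c == o) = false) :
    ∀ (l : List Char), l ≠ [] → hasPairB o c l = false → (∀ x ∈ l, x = o ∨ x = c) →
      ¬ ((l.foldl (dyckStepB o) (0, 0)).1 = 0 ∧ (l.foldl (dyckStepB o) (0, 0)).2 = 0) := by
  intro l hnil h hmem
  cases l with
  | nil => exact absurd rfl hnil
  | cons a rest =>
      rcases hmem a (by simp) with rfl | rfl
      · -- starts with the opener: the whole word is openers, so the balance is positive
        intro ⟨hb, _⟩
        have hall : ∀ x ∈ rest, x = a := noPair_all_opener a c rest h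
          (fun x hx => hmem x (by simp [hx]))
        have hcount : (a :: rest).count a = (a :: rest).length := by
          rw [List.count_eq_length]
          intro b hb'
          rcases List.mem_cons.mp hb' with rfl | hb'
          · rfl
          · exact (hall b hb').symm
        have := dyck_bal_eq a (a :: rest) (0, 0)
        rw [hcount] at this
        simp only [List.length_cons] at this
        omega
      · -- starts with the closer: the minimum drops to -1 immediately and never recovers
        intro ⟨_, hlow⟩
        have hstep : dyckStepB o (0, 0) a = (-1, -1) := by
          simp [dyckStepB, hne]
        simp only [List.foldl_cons, hstep] at hlow
        have := dyck_low_le o rest (-1, -1)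
        omega

-- the rewriting loop empties the word iff balance and minimum are both 0
lemma reduceB_empty_iff (o c : Char) (hne : (c == o) = false) :
    ∀ (l : List Char), (∀ x ∈ l, x = o ∨ x = c) →
      ((reduceB o c l = []) ↔
        ((l.foldl (dyckStepB o) (0, 0)).1 = 0 ∧ (l.foldl (dyckStepB o) (0, 0)).2 = 0)) := by
  intro l
  induction hn : l.length using Nat.strong_induction_on generalizing l with
  | _ n ih =>
      intro hmem
      rw [reduceB]
      by_cases h : hasPairB o c l = true
      · rw [dif_pos h]
        have hlen := removeFirstB_length_lt o c l h
        have hmem' : ∀ x ∈ removeFirstB o c l, x = o ∨ x = c :=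
          fun x hx => hmem x (removeFirstB_subset o c l x hx)
        have := ih (removeFirstB o c l).length (by omega) (removeFirstB o c l) rfl hmem'
        rw [this, removeFirstB_fold o c hne l (0, 0) (by simp) h]
      · rw [dif_neg h]
        constructor
        · intro hl; subst hl; simp
        · intro hbal
          by_contra hnil
          exact noPair_not_balanced o c hne l hnil (by simpa using h) hmem hbal

-- the first character differing from o in a {o,k1}-word containing k1 is k1
lemma find_closer (o k1 : Char) (hne : k1 ≠ o) :
    ∀ (l : List Char), (∀ x ∈ l, x = o ∨ x = k1) → k1 ∈ l →
      l.find? (fun ch => ch != o) = some k1 := by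
  intro l
  induction l with
  | nil => intro _ h; simp at h
  | cons a rest ih =>
      intro hmem hk
      rcases hmem a (by simp) with rfl | rfl
      · have : k1 ∈ rest := by
          rcases List.mem_cons.mp hk with h | h
          · exact absurd h hne
          · exact h
        rw [List.find?_cons_of_neg (by simp)]
        exact ih (fun x hx => hmem x (by simp [hx])) this
      · rw [List.find?_cons_of_pos (by simpa using hne)]

-- ===== VERDICT =====
theorem is_a_dyck_word_spec : Claim_equal_is_a_dyck_word := by
  intro word _
  unfold Spec_is_a_dyck_word is_a_dyck_word is_a_dyck_word_alt
  cases hw : word.toList with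
  | nil => rfl
  | cons c0 tl =>
    simp only [List.isEmpty_cons, Bool.false_eq_true, if_false, List.head?_cons]
    by_cases hset : (PySem.Set.ofList (c0 :: tl)).length ≠ 2
    · rw [if_pos hset, if_pos hset]
    · rw [if_neg hset, if_neg hset]
      push Not at hset
      have hkeys : (PySem.Dict.counter (c0 :: tl)).keys = PySem.Set.ofList (c0 :: tl) :=
        PySem.Dict.keys_counter _
      obtain ⟨s, hs⟩ : ∃ s, PySem.Set.ofList (c0 :: tl) = c0 :: s := by
        rw [PySem.Set.ofList_cons]; exact ⟨_, rfl⟩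
      have hslen : s.length = 1 := by
        have := hset; rw [hs] at this; simpa using this
      obtain ⟨k1, rfl⟩ : ∃ k1, s = [k1] := by
        cases s with
        | nil => simp at hslen
        | cons a t => cases t with
          | nil => exact ⟨a, rfl⟩
          | cons b u => simp at hslen
      have hnd : (PySem.Set.ofList (c0 :: tl)).Nodup := PySem.Set.nodup_ofList _
      have hne : c0 ≠ k1 := by
        rw [hs, List.nodup_cons] at hnd
        exact fun e => hnd.1 (by simp [e])
      have hmem : ∀ x ∈ (c0 :: tl), x = c0 ∨ x = k1 := by
        intro x hx
        have : x ∈ PySem.Set.ofList (c0 :: tl) := (PySem.Set.mem_ofList _ _).mpr hx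
        rw [hs] at this; simpa using this
      have hk1mem : k1 ∈ (c0 :: tl) := by
        have : k1 ∈ PySem.Set.ofList (c0 :: tl) := by rw [hs]; simp
        exact (PySem.Set.mem_ofList _ _).mp this
      rw [hkeys, hs]
      rw [find_closer c0 k1 (Ne.symm hne) (c0 :: tl) hmem hk1mem]
      simp only [PySem.Dict.getD_counter]
      have hbal := dyck_bal_eq c0 (c0 :: tl) (0, 0)
      have hcnt := dyck_count_partition c0 k1 hne (c0 :: tl) hmem
      have hred := reduceB_empty_iff c0 k1 (by simpa using Ne.symm hne) (c0 :: tl) hmem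
      by_cases hcq : ((c0 :: tl).count c0 : Int) ≠ ((c0 :: tl).count k1 : Int)
      · rw [if_pos hcq]
        have hb : ((c0 :: tl).foldl (dyckStepB c0) (0, 0)).1 ≠ 0 := by omega
        have : ¬ (reduceB c0 k1 (c0 :: tl) = []) := fun h => hb (hred.mp h).1
        simp [this]
      · rw [if_neg hcq]
        push Not at hcq
        rw [dyckLoopA_eq c0 (c0 :: tl) []]
        have hb : ((c0 :: tl).foldl (dyckStepB c0) (0, 0)).1 = 0 := by omega
        simp only [List.length_nil, Nat.cast_zero]
        rw [decide_eq_decide]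
        exact ⟨fun hz => hred.mpr ⟨hb, hz⟩, fun h => (hred.mp h).2⟩
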